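-- pv_equiv track=rewrite | github.com/ju5nj0se/Ejercicios-Andres-cortes-python- | Semana3_Ejercicios/Ejercicios1/14.py | vocales
-- ===== SOURCE A (Python) =====
-- def vocales(lista):
--     Vocales = [[],[],[],[],[]]
--
--     for i in lista:
--         match i:
--             case "a":
--                 Vocales[0].append(i)
--             case "e":
--                 Vocales[1].append(i)
--             case "i":
--                 Vocales[2].append(i)
--             case "o":
--                 Vocales[3].append(i)
--             case "u":
--                 Vocales[4].append(i)
--
--     return Vocales
-- ===== SOURCE B (Python) =====
-- def vocales(lista):
--     return [[x for x in lista if x == v] for v in ["a", "e", "i", "o", "u"]]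
-- ===== Notes on version B (the rewrite author's own statement) =====
-- stated objective: idiomatic
-- what changed: Replaced the single dispatch loop appending into five mutable buckets by five independent filter passes, one per vowel.
import Mathlib
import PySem

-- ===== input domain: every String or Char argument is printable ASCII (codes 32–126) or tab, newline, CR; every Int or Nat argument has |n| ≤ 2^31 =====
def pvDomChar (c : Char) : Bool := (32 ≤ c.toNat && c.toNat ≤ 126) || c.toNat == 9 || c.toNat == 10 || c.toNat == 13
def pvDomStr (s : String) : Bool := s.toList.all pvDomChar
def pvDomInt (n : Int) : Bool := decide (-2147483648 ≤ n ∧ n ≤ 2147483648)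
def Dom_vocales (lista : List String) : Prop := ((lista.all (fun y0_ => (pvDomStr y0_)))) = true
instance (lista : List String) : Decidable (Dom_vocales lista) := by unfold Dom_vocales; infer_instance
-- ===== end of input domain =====

-- B's equivalence is proved for the return value; A mutates only its local buckets, no argument.

-- ===== PORT A =====
-- A: one pass over lista, dispatching each element into one of five buckets.
def vocalesStep (st : List String × List String × List String × List String × List String)
    (i : String) : List String × List String × List String × List String × List String :=
  match st with
  | (a, e, ii, o, u) =>
    if i = "a" then (a ++ [i], e, ii, o, u)
    else if i = "e" then (a, e ++ [i], ii, o, u)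
    else if i = "i" then (a, e, ii ++ [i], o, u)
    else if i = "o" then (a, e, ii, o ++ [i], u)
    else if i = "u" then (a, e, ii, o, u ++ [i])
    else (a, e, ii, o, u)

def vocales (lista : List String) : List (List String) :=
  match lista.foldl vocalesStep ([], [], [], [], []) with
  | (a, e, i, o, u) => [a, e, i, o, u]

-- ===== PORT B =====
-- B: five independent filter passes, one per vowel.
def vocales_alt (lista : List String) : List (List String) :=
  ["a", "e", "i", "o", "u"].map (fun v => lista.filter (fun x => x = v))

-- ===== PRECONDITION & SPEC =====
def Spec_vocales (lista : List String) (out : List (List String)) : Prop := out = vocales_alt lista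
instance (lista : List String) (out : List (List String)) : Decidable (Spec_vocales lista out) := by unfold Spec_vocales; infer_instance

-- ===== CLAIM (what is proved, stated in full; the proofs are below) =====
def Claim_equal_vocales : Prop := ∀ (lista : List String), Dom_vocales lista → Spec_vocales lista (vocales lista)

-- ===== LEMMAS AND PROOFS =====
-- Loop invariant: the fold extends each accumulator bucket by that vowel's filter of the remaining list.
theorem vocales_fold_inv (l : List String) (a e i o u : List String) :
    l.foldl vocalesStep (a, e, i, o, u) =
      (a ++ l.filter (fun x => x = "a"), e ++ l.filter (fun x => x = "e"),
       i ++ l.filter (fun x => x = "i"), o ++ l.filter (fun x => x = "o"),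
       u ++ l.filter (fun x => x = "u")) := by
  induction l generalizing a e i o u with
  | nil => simp
  | cons h t ih =>
    simp only [List.foldl_cons, vocalesStep, List.filter_cons]
    split_ifs <;> simp_all

-- ===== VERDICT (by name: the statement is the Claim_ definition above) =====
theorem vocales_spec : Claim_equal_vocales := by
  intro lista _
  show vocales lista = vocales_alt lista
  simp [vocales, vocales_alt, vocales_fold_inv]
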